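-- pv_equiv track=rewrite | github.com/LiQian2023/daily_practice_py | 25.10.28_leetcode/practice.py | countValidSelections1
-- ===== SOURCE A (Python) =====
-- def countValidSelections1(nums):
--     """
--     :type nums: List[int]
--     :rtype: int
--     """
--     suffix = sum(nums)
--     ans, prefix = 0, 0
--     for num in nums:
--         if num:
--             prefix += num
--         elif suffix == prefix * 2:
--             ans += 2
--         elif abs(prefix * 2 - suffix) == 1:
--             ans += 1
--     return ans
-- ===== SOURCE B (Python) =====
-- def countValidSelections1(nums):
--     """
--     :type nums: List[int]
--     :rtype: int
--     """
--     ans = 0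
--     for i, x in enumerate(nums):
--         if x == 0:
--             left = sum(nums[:i])
--             right = sum(nums[i + 1:])
--             if left == right:
--                 ans += 2
--             elif abs(left - right) == 1:
--                 ans += 1
--     return ans
-- ===== Notes on version B (the rewrite author's own statement) =====
-- stated objective: alternative
-- what changed: B drops A's fused running-prefix state machine entirely: for each zero position i it recomputes left = sum(nums[:i]) and right = sum(nums[i+1:]) directly from slices of the list and compares them, instead of A's single pass maintaining a running prefix and comparing prefix*2 against the precomputed total.
import Mathlib
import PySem

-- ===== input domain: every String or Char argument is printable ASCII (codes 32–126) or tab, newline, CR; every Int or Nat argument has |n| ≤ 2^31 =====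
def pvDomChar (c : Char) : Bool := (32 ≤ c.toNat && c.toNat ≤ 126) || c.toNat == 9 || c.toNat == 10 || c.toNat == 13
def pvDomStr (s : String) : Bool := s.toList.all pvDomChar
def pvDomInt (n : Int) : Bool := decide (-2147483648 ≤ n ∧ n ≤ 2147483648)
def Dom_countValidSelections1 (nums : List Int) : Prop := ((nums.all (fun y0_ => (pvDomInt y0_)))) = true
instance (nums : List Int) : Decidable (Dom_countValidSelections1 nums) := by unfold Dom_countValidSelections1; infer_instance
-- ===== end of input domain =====

-- B replaces A's fused running-prefix loop by a direct per-zero-position check that recomputes left/right sums from slices (alternative algorithm; O(n^2) vs A's O(n)); return-value equivalence only.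


-- ===== PORT A =====
def countValidSelections1 (nums : List Int) : Int :=
  let suffix := nums.sum
  let st := nums.foldl (fun (s : Int × Int) num =>
    if num ≠ 0 then (s.1, s.2 + num)
    else if suffix = s.2 * 2 then (s.1 + 2, s.2)
    else if (s.2 * 2 - suffix).natAbs = 1 then (s.1 + 1, s.2)
    else s) (0, 0)
  st.1

-- ===== PORT B =====
def countValidSelections1_alt (nums : List Int) : Int :=
  (PySem.List.enumerate nums 0).foldl (fun ans (p : Int × Int) =>
    if p.2 = 0 then
      let left := (PySem.List.slice nums none (some p.1)).sum
      let right := (PySem.List.slice nums (some (p.1 + 1)) none).sum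
      if left = right then ans + 2
      else if (left - right).natAbs = 1 then ans + 1
      else ans
    else ans) 0

-- ===== PRECONDITION & SPEC =====
def Spec_countValidSelections1 (nums : List Int) (out : Int) : Prop := out = countValidSelections1_alt nums
instance (nums : List Int) (out : Int) : Decidable (Spec_countValidSelections1 nums out) := by unfold Spec_countValidSelections1; infer_instance

-- ===== CLAIM (what is proved, stated in full; the proofs are below) =====
def Claim_equal_countValidSelections1 : Prop := ∀ (nums : List Int), Dom_countValidSelections1 nums → Spec_countValidSelections1 nums (countValidSelections1 nums)

-- ===== LEMMAS AND PROOFS =====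

-- main invariant: A's fused loop over the remaining xs, started with prefix = c.sum,
-- equals B's loop over the enumerate of xs starting at index c.length (nums = c ++ xs)
theorem pv_main_inv (nums : List Int) : ∀ (xs c : List Int) (ans : Int), nums = c ++ xs →
    (xs.foldl (fun (s : Int × Int) num =>
      if num ≠ 0 then (s.1, s.2 + num)
      else if nums.sum = s.2 * 2 then (s.1 + 2, s.2)
      else if (s.2 * 2 - nums.sum).natAbs = 1 then (s.1 + 1, s.2)
      else s) (ans, c.sum)).1
    = (PySem.List.enumerate xs (c.length : Int)).foldl (fun a (p : Int × Int) =>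
        if p.2 = 0 then
          let left := (PySem.List.slice nums none (some p.1)).sum
          let right := (PySem.List.slice nums (some (p.1 + 1)) none).sum
          if left = right then a + 2
          else if (left - right).natAbs = 1 then a + 1
          else a
        else a) ans := by
  intro xs
  induction xs with
  | nil => intro c ans h; rfl
  | cons x xs ih =>
      intro c ans h
      rw [PySem.List.enumerate_cons]
      simp only [List.foldl_cons]
      by_cases hx : x = 0
      · subst hx
        have hleft : (PySem.List.slice nums none (some (c.length : Int))).sum = c.sum := by
          rw [PySem.List.slice_to_natCast, h, List.take_left]
        have hright : (PySem.List.slice nums (some ((c.length : Int) + 1)) none).sum = xs.sum := by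
          have : (c.length : Int) + 1 = ((c.length + 1 : Nat) : Int) := by push_cast; ring
          rw [this, PySem.List.slice_from_natCast, h]
          have : (c ++ 0 :: xs).drop (c.length + 1) = xs := by
            rw [show c.length + 1 = c.length + 1 from rfl, ← List.drop_drop]
            simp
          rw [this]
        have hsum : nums.sum = c.sum + xs.sum := by
          rw [h]; simp
        simp only [ne_eq, not_true_eq_false, if_false, ite_true, hleft, hright]
        have step : ∀ a : Int,
            (if nums.sum = c.sum * 2 then (a + 2, c.sum)
             else if (c.sum * 2 - nums.sum).natAbs = 1 then (a + 1, c.sum)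
             else (a, c.sum))
            = ((if c.sum = xs.sum then a + 2
                else if (c.sum - xs.sum).natAbs = 1 then a + 1 else a), c.sum) := by
          intro a
          by_cases h1 : nums.sum = c.sum * 2
          · have h1' : c.sum = xs.sum := by omega
            simp [h1, h1']
          · have h1' : ¬ c.sum = xs.sum := by omega
            by_cases h2 : (c.sum * 2 - nums.sum).natAbs = 1
            · have h2' : (c.sum - xs.sum).natAbs = 1 := by
                have : c.sum - xs.sum = c.sum * 2 - nums.sum := by omega
                rw [this]; exact h2
              simp [h1, h1', h2, h2']
            · have h2' : ¬ (c.sum - xs.sum).natAbs = 1 := by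
                have : c.sum - xs.sum = c.sum * 2 - nums.sum := by omega
                rw [this]; exact h2
              simp [h1, h1', h2, h2']
        have trans : ∀ (a₂ : Int × Int), a₂ = ((if c.sum = xs.sum then ans + 2
                else if (c.sum - xs.sum).natAbs = 1 then ans + 1 else ans), c.sum) →
            (xs.foldl (fun (s : Int × Int) num =>
              if num ≠ 0 then (s.1, s.2 + num)
              else if nums.sum = s.2 * 2 then (s.1 + 2, s.2)
              else if (s.2 * 2 - nums.sum).natAbs = 1 then (s.1 + 1, s.2)
              else s) a₂).1
            = (PySem.List.enumerate xs ((c.length : Int) + 1)).foldl (fun a (p : Int × Int) =>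
                if p.2 = 0 then
                  let left := (PySem.List.slice nums none (some p.1)).sum
                  let right := (PySem.List.slice nums (some (p.1 + 1)) none).sum
                  if left = right then a + 2
                  else if (left - right).natAbs = 1 then a + 1
                  else a
                else a) (if c.sum = xs.sum then ans + 2
                  else if (c.sum - xs.sum).natAbs = 1 then ans + 1 else ans) := by
          intro a₂ ha
          have hc' : nums = (c ++ [0]) ++ xs := by rw [h]; simp
          have hlen : ((c ++ [(0:Int)]).length : Int) = (c.length : Int) + 1 := by
            simp
          have hsum' : (c ++ [(0:Int)]).sum = c.sum := by simp
          have := ih (c ++ [0]) (if c.sum = xs.sum then ans + 2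
                  else if (c.sum - xs.sum).natAbs = 1 then ans + 1 else ans) hc'
          rw [hlen, hsum'] at this
          rw [ha]; exact this
        rw [step ans]
        exact trans _ rfl
      · simp only [hx, ne_eq, not_false_eq_true, if_true]
        have hc' : nums = (c ++ [x]) ++ xs := by rw [h]; simp
        have := ih (c ++ [x]) ans hc'
        have hlen : ((c ++ [x]).length : Int) = (c.length : Int) + 1 := by simp
        have hsum' : (c ++ [x]).sum = c.sum + x := by simp
        rw [hlen, hsum'] at this
        exact this

-- ===== VERDICT (by name: the statement is the Claim_ definition above) =====
theorem countValidSelections1_spec : Claim_equal_countValidSelections1 := by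
  intro nums _
  unfold Spec_countValidSelections1 countValidSelections1 countValidSelections1_alt
  have := pv_main_inv nums nums [] 0 (by simp)
  simpa using this
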